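-- pv_equiv track=rewrite | github.com/lacanlale/practice | ctci/arrays/zero_matrix.py | zero_it
-- ===== SOURCE A (Python) =====
-- def zero_it(mat : [[]]) -> [[]]:
--     # r x c
--     cols = set()
--     for ind_i, i in enumerate(mat):
--         for ind_j, j in enumerate(i):
--             if j == 0:
--                 cols.add(ind_j)
--
--     for col in cols:
--         for i in range(0, len(mat)):
--             mat[i][col] = 0
--     return mat
-- ===== SOURCE B (Python) =====
-- def zero_it(mat : [[]]) -> [[]]:
--     # Column-major single structure: per column, detect a zero then zero the column.
--     width = max((len(row) for row in mat), default=0)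
--     for c in range(width):
--         if any(c < len(row) and row[c] == 0 for row in mat):
--             for row in mat:
--                 if c < len(row):
--                     row[c] = 0
--     return mat
-- ===== Notes on version B (the rewrite author's own statement) =====
-- stated objective: simpler
-- what changed: Replaced A's two-phase set-collecting pass (gather zero-column indices into a set, then rewrite every row per collected column) with a single column-major scan that detects and zeroes each column in one place, maintaining no set; Pre_ excludes ragged inputs where a zero column index exceeds some row's length, on which A raises IndexError.
import Mathlib
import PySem

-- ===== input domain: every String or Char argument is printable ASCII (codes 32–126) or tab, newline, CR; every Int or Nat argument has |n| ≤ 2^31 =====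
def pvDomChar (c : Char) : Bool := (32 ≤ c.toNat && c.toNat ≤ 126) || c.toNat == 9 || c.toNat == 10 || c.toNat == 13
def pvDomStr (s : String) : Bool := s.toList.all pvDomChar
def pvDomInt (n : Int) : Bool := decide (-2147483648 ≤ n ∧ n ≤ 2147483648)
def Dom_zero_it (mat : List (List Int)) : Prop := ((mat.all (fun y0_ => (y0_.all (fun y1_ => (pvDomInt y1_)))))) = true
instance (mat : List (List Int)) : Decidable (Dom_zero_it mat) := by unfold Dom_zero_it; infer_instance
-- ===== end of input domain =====

-- B replaces A's two-phase set-of-columns pass by a single column-major scan (no set);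
-- objective: simpler. Both Pythons mutate `mat` in place and return it; the equivalence
-- proved here is about the RETURN value (B performs the same in-place mutation).

-- ===== PORT A =====
-- `mat[i][col] = 0`: inside Pre_ both i and col are in range; out of range Python raises
-- (excluded by Pre_) and this port leaves the list unchanged (List.set/modify no-op).
-- `col` comes from enumerate so col ≥ 0 and `.toNat` is exact.
def zero_it (mat : List (List Int)) : List (List Int) :=
  let cols : PySem.Set Int :=
    (PySem.List.enumerate mat).foldl
      (fun s p =>
        (PySem.List.enumerate p.2).foldl
          (fun s q => if q.2 == 0 then PySem.Set.add s q.1 else s) s)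
      PySem.Set.empty
  -- iterating the Python set: each iteration writes zeros only, so the result
  -- does not depend on the set's iteration order
  cols.foldl
    (fun m col =>
      (List.range m.length).foldl (fun m i => m.modify i (fun r => r.set col.toNat 0)) m)
    mat

-- ===== PORT B =====
-- `row[c]` is read only under the guard c < len(row), where getD is exact.
def zero_it_alt (mat : List (List Int)) : List (List Int) :=
  let width := (mat.map List.length).foldl max 0
  (List.range width).foldl
    (fun m c =>
      if m.any (fun row => decide (c < row.length) && (row.getD c 1 == 0)) then
        m.map (fun row => if c < row.length then row.set c 0 else row)
      else m)
    mat

-- ===== PRECONDITION & SPEC =====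
-- Pre_ excludes exactly the ragged matrices on which the Python A raises IndexError:
-- some row has a zero at column c while another row has length ≤ c.
def Pre_zero_it (mat : List (List Int)) : Prop :=
  ∀ r ∈ mat, ∀ c ∈ List.range r.length, r.getD c 1 = 0 → ∀ r' ∈ mat, c < r'.length
instance (mat : List (List Int)) : Decidable (Pre_zero_it mat) := by
  unfold Pre_zero_it; infer_instance
def pvWitness_zero_it : List (List Int) := [[1, 0], [2, 3]]


def Spec_zero_it (mat : List (List Int)) (out : List (List Int)) : Prop := out = zero_it_alt mat
instance (mat : List (List Int)) (out : List (List Int)) : Decidable (Spec_zero_it mat out) := by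
  unfold Spec_zero_it; infer_instance

-- ===== CLAIM (what is proved, stated in full; the proofs are below) =====
def Claim_equal_zero_it : Prop :=
  ∀ (mat : List (List Int)), Dom_zero_it mat → Pre_zero_it mat → Spec_zero_it mat (zero_it mat)

-- ===== LEMMAS AND PROOFS =====

-- `zcol mat c` : some row of mat has a zero at column c (getD's default 1 rules out short rows)
def zcol (mat : List (List Int)) (c : Nat) : Bool := mat.any (fun r => r.getD c 1 == 0)

-- the common normal form of both ports
def zspec (mat : List (List Int)) : List (List Int) :=
  mat.map (fun r => r.mapIdx (fun c x => if zcol mat c then 0 else x))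

theorem mem_inner (r : List Int) : ∀ (n : Int) (s : PySem.Set Int) (x : Int),
    (x ∈ (PySem.List.enumerate r n).foldl
      (fun s q => if q.2 == 0 then PySem.Set.add s q.1 else s) s) ↔
    x ∈ s ∨ ∃ k : Nat, x = n + (k : Int) ∧ r.getD k 1 = 0 := by
  induction r with
  | nil => simp [PySem.List.enumerate_nil]
  | cons a r ih =>
    intro n s x
    rw [PySem.List.enumerate_cons, List.foldl_cons, ih]
    constructor
    · rintro (hs | ⟨k, hx, hk⟩)
      · by_cases h0 : a = 0
        · simp only [h0, beq_self_eq_true, if_pos] at hs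
          rcases (PySem.Set.mem_add _ _ _).1 hs with h | h
          · exact Or.inl h
          · exact Or.inr ⟨0, by omega, by simpa using h0⟩
        · simp only [beq_iff_eq, h0, if_neg, not_false_iff] at hs
          exact Or.inl hs
      · exact Or.inr ⟨k + 1, by push_cast; omega, by simpa using hk⟩
    · rintro (hs | ⟨k, hx, hk⟩)
      · refine Or.inl ?_
        split
        · exact (PySem.Set.mem_add _ _ _).2 (Or.inl hs)
        · exact hs
      · match k with
        | 0 =>
          simp only [List.getD] at hk
          simp only [List.getElem?_cons_zero] at hk
          refine Or.inl ?_
          have h0 : a = 0 := by simpa using hk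
          simp only [h0, beq_self_eq_true, if_pos]
          exact (PySem.Set.mem_add _ _ _).2 (Or.inr (by push_cast at hx; omega))
        | k + 1 =>
          exact Or.inr ⟨k, by push_cast at hx ⊢; omega, by simpa using hk⟩

theorem mem_outer (mat : List (List Int)) : ∀ (n : Int) (s : PySem.Set Int) (x : Int),
    (x ∈ (PySem.List.enumerate mat n).foldl
      (fun s p => (PySem.List.enumerate p.2).foldl
        (fun s q => if q.2 == 0 then PySem.Set.add s q.1 else s) s) s) ↔
    x ∈ s ∨ ∃ r ∈ mat, ∃ k : Nat, x = (k : Int) ∧ r.getD k 1 = 0 := by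
  induction mat with
  | nil => simp [PySem.List.enumerate_nil]
  | cons a mat ih =>
    intro n s x
    rw [PySem.List.enumerate_cons, List.foldl_cons, ih, mem_inner]
    simp only [List.mem_cons]
    constructor
    · rintro ((hs | ⟨k, hx, hk⟩) | ⟨r, hr, k, hx, hk⟩)
      · exact Or.inl hs
      · exact Or.inr ⟨a, Or.inl rfl, k, by omega, hk⟩
      · exact Or.inr ⟨r, Or.inr hr, k, hx, hk⟩
    · rintro (hs | ⟨r, (rfl | hr), k, hx, hk⟩)
      · exact Or.inl (Or.inl hs)
      · exact Or.inl (Or.inr ⟨k, by omega, hk⟩)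
      · exact Or.inr ⟨r, hr, k, hx, hk⟩

-- `zcol mat c` : some row of mat has a zero at column c

theorem zcol_iff (mat : List (List Int)) (c : Nat) :
    zcol mat c = true ↔ ∃ r ∈ mat, r.getD c 1 = 0 := by
  simp [zcol]

theorem foldl_range_modify (g : List Int → List Int) :
    ∀ (n : Nat) (m : List (List Int)),
      (List.range n).foldl (fun m i => m.modify i g) m =
        m.mapIdx (fun i r => if i < n then g r else r) := by
  intro n
  induction n with
  | zero =>
    intro m
    apply List.ext_getElem?
    intro j
    simp [List.getElem?_mapIdx, Option.map_id']
  | succ n ih =>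
    intro m
    rw [List.range_succ, List.foldl_append, List.foldl_cons, List.foldl_nil, ih]
    apply List.ext_getElem?
    intro j
    rw [List.getElem?_modify]
    simp only [List.getElem?_mapIdx]
    cases m[j]? with
    | none => rfl
    | some r =>
      simp only [Option.map_some]
      by_cases h : n = j <;> simp [h] <;> split_ifs <;> simp_all <;> omega

theorem range_modify_eq_map (g : List Int → List Int) (m : List (List Int)) :
    (List.range m.length).foldl (fun m i => m.modify i g) m = m.map g := by
  rw [foldl_range_modify]
  apply List.ext_getElem?
  intro j
  simp only [List.getElem?_mapIdx, List.getElem?_map]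
  cases hj : m[j]? with
  | none => rfl
  | some r =>
    have : j < m.length := (List.getElem?_eq_some_iff.1 hj).1
    simp [this]

theorem rowfold_getElem? (L : List Int) : ∀ (r : List Int) (j : Nat),
    (L.foldl (fun r col => r.set col.toNat 0) r)[j]? =
      if (∃ c ∈ L, c.toNat = j) ∧ j < r.length then some (0 : Int) else r[j]? := by
  induction L with
  | nil => intro r j; simp
  | cons c L ih =>
    intro r j
    rw [List.foldl_cons, ih]
    simp only [List.length_set, List.getElem?_set, List.mem_cons]
    by_cases hout : j < r.length
    · by_cases hc : c.toNat = j <;> split_ifs <;> simp_all <;> tauto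
    · have h1 : r[j]? = none := List.getElem?_eq_none (by omega)
      split_ifs <;> simp_all

theorem foldl_mapset (L : List Int) : ∀ (m : List (List Int)),
    L.foldl (fun m col =>
        (List.range m.length).foldl (fun m i => m.modify i (fun r => r.set col.toNat 0)) m) m
      = m.map (fun r => L.foldl (fun r col => r.set col.toNat 0) r) := by
  induction L with
  | nil => intro m; simp
  | cons c L ih =>
    intro m
    rw [List.foldl_cons, range_modify_eq_map, ih, List.map_map]
    rfl

theorem zero_it_eq_zspec (mat : List (List Int)) : zero_it mat = zspec mat := by
  unfold zero_it zspec
  rw [foldl_mapset]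
  apply List.map_congr_left
  intro r _hr
  apply List.ext_getElem?
  intro j
  rw [rowfold_getElem?]
  simp only [List.getElem?_mapIdx]
  have hmem : (∃ c ∈ (PySem.List.enumerate mat).foldl
      (fun s p => (PySem.List.enumerate p.2).foldl
        (fun s q => if q.2 == 0 then PySem.Set.add s q.1 else s) s)
      PySem.Set.empty, c.toNat = j) ↔ zcol mat j = true := by
    constructor
    · rintro ⟨c, hc, rfl⟩
      rcases (mem_outer mat 0 PySem.Set.empty c).1 hc with h | ⟨r', hr', k, rfl, hk⟩
      · simp [PySem.Set.empty] at h
      · rw [Int.toNat_natCast]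
        exact (zcol_iff _ _).2 ⟨r', hr', hk⟩
    · intro h
      rcases (zcol_iff _ _).1 h with ⟨r', hr', hk⟩
      exact ⟨(j : Int), (mem_outer mat 0 PySem.Set.empty j).2 (Or.inr ⟨r', hr', j, rfl, hk⟩),
        Int.toNat_natCast j⟩
  by_cases hj : j < r.length
  · have : r[j]? = some r[j] := List.getElem?_eq_some_iff.2 ⟨hj, rfl⟩
    rw [this]
    simp only [Option.map_some]
    by_cases hz : zcol mat j = true
    · rw [if_pos ⟨hmem.2 hz, hj⟩]; simp [hz]
    · rw [if_neg (fun h => hz (hmem.1 h.1))]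
      simp only [hz]
      simp [Bool.not_eq_true] at hz
      simp [hz]
  · have : r[j]? = none := List.getElem?_eq_none (by omega)
    rw [this, if_neg (fun h => hj h.2)]
    rfl

theorem le_foldl_max : ∀ (l : List Nat) (a : Nat), a ≤ l.foldl max a := by
  intro l
  induction l with
  | nil => intro a; simp
  | cons x l ih => intro a; exact le_trans (le_max_left a x) (ih (max a x))

theorem mem_le_foldl_max : ∀ (l : List Nat) (a x : Nat), x ∈ l → x ≤ l.foldl max a := by
  intro l
  induction l with
  | nil => simp
  | cons y l ih =>
    intro a x hx
    rcases List.mem_cons.1 hx with rfl | hx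
    · exact le_trans (le_max_right a x) (le_foldl_max l (max a x))
    · exact ih (max a y) x hx

theorem mapIdx_congr' (f g : Nat → Int → Int) (r : List Int)
    (h : ∀ j, j < r.length → ∀ x, f j x = g j x) : r.mapIdx f = r.mapIdx g := by
  apply List.ext_getElem?
  intro j
  simp only [List.getElem?_mapIdx]
  cases hj : r[j]? with
  | none => rfl
  | some x =>
    have := (List.getElem?_eq_some_iff.1 hj).1
    simp [h j this x]

theorem b_inv (mat : List (List Int)) : ∀ (n : Nat),
    (List.range n).foldl
      (fun m c =>
        if m.any (fun row => decide (c < row.length) && (row.getD c 1 == 0)) then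
          m.map (fun row => if c < row.length then row.set c 0 else row)
        else m)
      mat
    = mat.map (fun r => r.mapIdx (fun j x => if j < n ∧ zcol mat j = true then 0 else x)) := by
  intro n
  induction n with
  | zero =>
    simp only [List.range_zero, List.foldl_nil]
    apply Eq.symm
    calc List.map (fun r => List.mapIdx (fun j x => if j < 0 ∧ zcol mat j = true then 0 else x) r) mat
        = List.map (fun r => r) mat := by
          apply List.map_congr_left
          intro r _
          apply List.ext_getElem?
          intro j
          simp [List.getElem?_mapIdx, Option.map_id']
      _ = mat := List.map_id' mat
  | succ n ih =>
    rw [List.range_succ, List.foldl_append, List.foldl_cons, List.foldl_nil, ih]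
    have hdet : (mat.map (fun r => r.mapIdx (fun j x => if j < n ∧ zcol mat j = true then 0 else x))).any
        (fun row => decide (n < row.length) && (row.getD n 1 == 0)) = zcol mat n := by
      rw [List.any_map]
      apply List.any_congr rfl
      intro r
      simp only [Function.comp]
      by_cases hn : n < r.length
      · have hlen : (r.mapIdx (fun j x => if j < n ∧ zcol mat j = true then 0 else x)).length = r.length :=
          List.length_mapIdx ..
        have hget : (r.mapIdx (fun j x => if j < n ∧ zcol mat j = true then 0 else x)).getD n 1 = r.getD n 1 := by
          rw [List.getD_eq_getElem?_getD, List.getD_eq_getElem?_getD, List.getElem?_mapIdx]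
          rw [List.getElem?_eq_some_iff.2 ⟨hn, rfl⟩]
          simp
        rw [hlen, hget]
        simp [hn]
      · have hlen : (r.mapIdx (fun j x => if j < n ∧ zcol mat j = true then 0 else x)).length = r.length :=
          List.length_mapIdx ..
        have h1 : r.getD n 1 = 1 := by
          rw [List.getD_eq_getElem?_getD, List.getElem?_eq_none (by omega)]; rfl
        have h2 : (r.mapIdx (fun j x => if j < n ∧ zcol mat j = true then 0 else x)).getD n 1 = 1 := by
          rw [List.getD_eq_getElem?_getD, List.getElem?_eq_none (by omega)]; rfl
        rw [hlen, h1, h2]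
        simp [hn]
    rw [hdet]
    by_cases hz : zcol mat n = true
    · rw [if_pos hz, List.map_map]
      apply List.map_congr_left
      intro r _
      simp only [Function.comp]
      have hlen : (r.mapIdx (fun j x => if j < n ∧ zcol mat j = true then 0 else x)).length = r.length :=
        List.length_mapIdx ..
      by_cases hn : n < r.length
      · rw [if_pos (by omega)]
        apply List.ext_getElem?
        intro j
        simp only [List.getElem?_set, List.getElem?_mapIdx, hlen]
        by_cases hj : n = j
        · subst hj
          rw [if_pos rfl, if_pos hn, List.getElem?_eq_some_iff.2 ⟨hn, rfl⟩]
          simp [hz]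
        · rw [if_neg hj]
          cases hrj : r[j]? with
          | none => rfl
          | some x =>
            simp only [Option.map_some, Option.some_inj]
            have : (j < n ∧ zcol mat j = true) ↔ (j < n + 1 ∧ zcol mat j = true) := by
              constructor
              · rintro ⟨h, h'⟩; exact ⟨by omega, h'⟩
              · rintro ⟨h, h'⟩; exact ⟨by omega, h'⟩
            split_ifs with h1 h2 h2 <;> tauto
      · rw [if_neg (by omega)]
        apply mapIdx_congr'
        intro j hj x
        have : j < n := by omega
        have : (j < n ∧ zcol mat j = true) ↔ (j < n + 1 ∧ zcol mat j = true) := by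
          constructor
          · rintro ⟨h, h'⟩; exact ⟨by omega, h'⟩
          · rintro ⟨h, h'⟩; exact ⟨this, h'⟩
        split_ifs <;> tauto
    · rw [if_neg hz]
      apply List.map_congr_left
      intro r _
      apply mapIdx_congr'
      intro j hj x
      have : (j < n ∧ zcol mat j = true) ↔ (j < n + 1 ∧ zcol mat j = true) := by
        constructor
        · rintro ⟨h, h'⟩; exact ⟨by omega, h'⟩
        · rintro ⟨h, h'⟩
          refine ⟨?_, h'⟩
          rcases Nat.lt_succ_iff_lt_or_eq.1 h with h | rfl
          · exact h
          · exact absurd h' hz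
      split_ifs <;> tauto

theorem zero_it_alt_eq_zspec (mat : List (List Int)) : zero_it_alt mat = zspec mat := by
  unfold zero_it_alt zspec
  rw [b_inv]
  apply List.map_congr_left
  intro r hr
  apply mapIdx_congr'
  intro j hj x
  have hw : r.length ≤ (mat.map List.length).foldl max 0 :=
    mem_le_foldl_max _ 0 r.length (List.mem_map.2 ⟨r, hr, rfl⟩)
  have hjw : j < (mat.map List.length).foldl max 0 := by omega
  by_cases hz : zcol mat j = true
  · rw [if_pos ⟨hjw, hz⟩, if_pos hz]
  · rw [if_neg (fun h => hz h.2), if_neg (by simp [hz])]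

-- ===== VERDICT (by name: the statement is the Claim_ definition above) =====
theorem zero_it_spec : Claim_equal_zero_it := by
  intro mat _ _
  unfold Spec_zero_it
  rw [zero_it_eq_zspec, zero_it_alt_eq_zspec]
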